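-- pv_equiv track=rewrite | github.com/AydroPunk/Proyecto_1-EDA-II | Programas/PP1P5.py | ordenamientoRel
-- ===== SOURCE A (Python) =====
-- def ordenamientoRel(A,B):
--     R = []
--     for i in B:
--         j = 0
--         while (True):
--             if j >= (len(A)):
--                 break
--             else:
--                 if A[j] == i:
--                     R.append(i)
--                     A.remove(i)
--                     j -= 1
--             j += 1
--     A.sort()
--     R.extend(A)
--     return R
-- ===== SOURCE B (Python) =====
-- def ordenamientoRel(A, B):
--     # Count occurrences once, emit per B's order (first occurrence only),
--     # then append the not-in-B remainder sorted. Unlike A, does not mutate A.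
--     cnt = {}
--     for x in A:
--         cnt[x] = cnt.get(x, 0) + 1
--     seen = set()
--     R = []
--     for i in B:
--         if i not in seen:
--             seen.add(i)
--             R += [i] * cnt.get(i, 0)
--     R += sorted(x for x in A if x not in seen)
--     return R
-- ===== Notes on version B (the rewrite author's own statement) =====
-- stated objective: faster
-- what changed: Replaced the per-B-element rescans with element-removal of the list by a single counting pass over A, a seen-set so each distinct B element is emitted once with its count, and one sort of the untouched remainder.
import Mathlib
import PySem

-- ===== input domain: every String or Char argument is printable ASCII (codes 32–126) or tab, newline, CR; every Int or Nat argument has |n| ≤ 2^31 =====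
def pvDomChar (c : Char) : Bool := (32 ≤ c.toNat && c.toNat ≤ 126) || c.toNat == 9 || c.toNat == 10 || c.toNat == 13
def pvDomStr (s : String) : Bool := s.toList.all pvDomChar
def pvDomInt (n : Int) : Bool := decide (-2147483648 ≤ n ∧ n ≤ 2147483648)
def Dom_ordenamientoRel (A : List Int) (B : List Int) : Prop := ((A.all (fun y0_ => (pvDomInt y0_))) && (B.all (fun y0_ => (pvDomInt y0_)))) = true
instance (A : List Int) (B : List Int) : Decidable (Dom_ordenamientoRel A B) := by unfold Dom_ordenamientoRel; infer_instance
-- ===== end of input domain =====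

-- B replaces A's per-B-element rescan-and-remove passes over A by one counting
-- pass, a seen-set and one sort of the remainder (faster); equivalence is about
-- the RETURN value only: the Python A mutates its argument A in place, B does not.

-- ===== PORT A =====
-- Inner 'while True' loop of A.  Python's j is only decremented immediately
-- before being re-incremented (net unchanged), so it never drops below 0 at the
-- loop test and a Nat index is exact.  A.remove(i) only runs when A[j] == i,
-- so i is present and '(remove? A i).getD A' is exactly Python's remove.
def pvLoopA (i : Int) (A : List Int) (R : List Int) (j : Nat) : List Int × List Int :=
  if h : A.length ≤ j then (A, R)
  else
    if A.getD j 0 == i then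
      pvLoopA i ((PySem.List.remove? A i).getD A) (R ++ [i]) j
    else
      pvLoopA i A R (j + 1)
termination_by A.length - j
decreasing_by
  · have hj : j < A.length := Nat.lt_of_not_le h
    have hmem : i ∈ A := by
      have : A.getD j 0 = i := by simpa using ‹(A.getD j 0 == i) = true›
      rw [← this, List.getD_eq_getElem _ _ hj]
      exact List.getElem_mem hj
    rw [PySem.List.remove?_eq_some_erase A i hmem]
    have := List.length_erase_of_mem hmem
    simp only [Option.getD_some]
    omega
  · omega

def ordenamientoRel (A : List Int) (B : List Int) : List Int :=
  let p := B.foldl (fun (p : List Int × List Int) i => pvLoopA i p.1 p.2 0) (A, [])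
  p.2 ++ PySem.List.sorted p.1 (fun x => x) false

-- ===== PORT B =====
def ordenamientoRel_alt (A : List Int) (B : List Int) : List Int :=
  let cnt : PySem.Dict Int Int := A.foldl (fun d x => d.insert x (d.getD x 0 + 1)) PySem.Dict.empty
  let p := B.foldl (fun (p : PySem.Set Int × List Int) i =>
      if PySem.Set.contains p.1 i then p
      else (PySem.Set.add p.1 i, p.2 ++ PySem.List.pyRepeat [i] (cnt.getD i 0)))
    (PySem.Set.empty, [])
  p.2 ++ PySem.List.sorted (A.filter (fun x => !(PySem.Set.contains p.1 x))) (fun x => x) false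

-- ===== PRECONDITION & SPEC =====
def Spec_ordenamientoRel (A : List Int) (B : List Int) (out : List Int) : Prop := out = ordenamientoRel_alt A B
instance (A : List Int) (B : List Int) (out : List Int) : Decidable (Spec_ordenamientoRel A B out) := by unfold Spec_ordenamientoRel; infer_instance

-- ===== CLAIM (what is proved, stated in full; the proofs are below) =====
def Claim_equal_ordenamientoRel : Prop := ∀ (A : List Int) (B : List Int), Dom_ordenamientoRel A B → Spec_ordenamientoRel A B (ordenamientoRel A B)

-- ===== LEMMAS AND PROOFS =====

-- What the inner while loop computes: entering at index j = |P| with no i in P,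
-- it strips every i from the suffix S and appends one i to R per occurrence.
theorem pvLoopA_spec (i : Int) : ∀ (S P R : List Int), i ∉ P →
    pvLoopA i (P ++ S) R P.length
      = (P ++ S.filter (fun x => !(x == i)), R ++ List.replicate (S.count i) i) := by
  intro S
  induction S with
  | nil =>
    intro P R _
    rw [pvLoopA]
    simp
  | cons x S' ih =>
    intro P R hP
    rw [pvLoopA]
    have hlen : ¬ (P ++ x :: S').length ≤ P.length := by simp
    rw [dif_neg hlen]
    have hget : (P ++ x :: S').getD P.length 0 = x := by
      rw [List.getD_eq_getElem _ _ (by simp)]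
      simp
    rw [hget]
    by_cases hx : x = i
    · subst hx
      rw [if_pos (by simp)]
      have hmem : x ∈ P ++ x :: S' := by simp
      rw [PySem.List.remove?_eq_some_erase (P ++ x :: S') x hmem, Option.getD_some,
          List.erase_append_right _ hP, List.erase_cons_head]
      rw [ih P (R ++ [x]) hP]
      simp [List.replicate_succ]
    · rw [if_neg (by simpa using hx)]
      have hlen1 : P.length + 1 = (P ++ [x]).length := by simp
      rw [show P ++ x :: S' = (P ++ [x]) ++ S' by simp, hlen1,
          ih (P ++ [x]) R (by simp [hP]; exact fun h => hx h.symm)]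
      simp [hx]

theorem pvLoopA_zero (i : Int) (A R : List Int) :
    pvLoopA i A R 0
      = (A.filter (fun x => !(x == i)), R ++ List.replicate (A.count i) i) := by
  simpa using pvLoopA_spec i A [] R (by simp)

-- The two B-loops in lock step: A's state is always (A filtered by the seen
-- set, the same R) where (seen, R) is B's state.
theorem pv_fold_rel (A : List Int) : ∀ (Bs : List Int) (seen : PySem.Set Int) (R : List Int),
    Bs.foldl (fun (p : List Int × List Int) i => pvLoopA i p.1 p.2 0)
        (A.filter (fun x => !(PySem.Set.contains seen x)), R)
      = ((A.filter (fun x => !(PySem.Set.contains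
            (Bs.foldl (fun (p : PySem.Set Int × List Int) i =>
                if PySem.Set.contains p.1 i then p
                else (PySem.Set.add p.1 i, p.2 ++ PySem.List.pyRepeat [i]
                  ((A.foldl (fun d x => d.insert x (d.getD x 0 + 1)) PySem.Dict.empty).getD i 0)))
              (seen, R)).1 x))),
         (Bs.foldl (fun (p : PySem.Set Int × List Int) i =>
                if PySem.Set.contains p.1 i then p
                else (PySem.Set.add p.1 i, p.2 ++ PySem.List.pyRepeat [i]
                  ((A.foldl (fun d x => d.insert x (d.getD x 0 + 1)) PySem.Dict.empty).getD i 0)))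
              (seen, R)).2) := by
  intro Bs
  induction Bs with
  | nil => intro seen R; rfl
  | cons i Bs' ih =>
    intro seen R
    simp only [List.foldl_cons]
    rw [pvLoopA_zero]
    by_cases hc : PySem.Set.contains seen i = true
    · have hfilter : (A.filter (fun x => !(PySem.Set.contains seen x))).filter (fun x => !(x == i))
          = A.filter (fun x => !(PySem.Set.contains seen x)) := by
        rw [List.filter_eq_self]
        intro x hx
        rcases List.mem_filter.1 hx with ⟨_, hxs⟩
        by_cases hxi : x = i
        · subst hxi; rw [hc] at hxs; simp at hxs
        · simpa using hxi
      have hcount : (A.filter (fun x => !(PySem.Set.contains seen x))).count i = 0 := by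
        rw [List.count_eq_zero]
        intro hmem
        rcases List.mem_filter.1 hmem with ⟨_, hxs⟩
        rw [hc] at hxs; simp at hxs
      rw [hfilter, hcount, if_pos hc, List.replicate_zero, List.append_nil]
      exact ih seen R
    · rw [if_neg hc]
      have hcf : PySem.Set.contains seen i = false := by
        cases h : PySem.Set.contains seen i
        · rfl
        · exact absurd h hc
      have hpt : ∀ x, ((!(PySem.Set.contains seen x)) && !(x == i))
          = !(PySem.Set.contains (PySem.Set.add seen i) x) := by
        intro x
        by_cases h1 : x ∈ seen <;> by_cases h2 : x = i <;>
          simp [h1, h2, PySem.Set.mem_add]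
      have hfilter : (A.filter (fun x => !(PySem.Set.contains seen x))).filter (fun x => !(x == i))
          = A.filter (fun x => !(PySem.Set.contains (PySem.Set.add seen i) x)) := by
        rw [List.filter_filter]
        exact List.filter_congr (fun x _ => by rw [Bool.and_comm]; exact hpt x)
      have hcount : (A.filter (fun x => !(PySem.Set.contains seen x))).count i = A.count i := by
        exact List.count_filter (by rw [hcf]; rfl)
      have hrep : List.replicate (A.count i) i
          = PySem.List.pyRepeat [i]
              ((A.foldl (fun d x => d.insert x (d.getD x 0 + 1)) PySem.Dict.empty).getD i 0) := by
        rw [PySem.List.pyRepeat_singleton, PySem.Dict.getD_foldl_insert_add_one]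
        simp [PySem.Dict.empty, PySem.Dict.getD, PySem.Dict.get?]
      rw [hfilter, hcount, hrep]
      exact ih (PySem.Set.add seen i) _

-- ===== VERDICT (by name: the statement is the Claim_ definition above) =====
theorem ordenamientoRel_spec : Claim_equal_ordenamientoRel := by
  unfold Claim_equal_ordenamientoRel
  intro A B _
  unfold Spec_ordenamientoRel
  simp only [ordenamientoRel, ordenamientoRel_alt]
  have h0 : A = A.filter (fun x => !(PySem.Set.contains (PySem.Set.empty : PySem.Set Int) x)) := by
    simp [PySem.Set.empty, PySem.Set.contains]
  conv_lhs => rw [h0]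
  rw [pv_fold_rel A B PySem.Set.empty []]
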